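-- pv_equiv track=rewrite | github.com/July-shisan/topcoder_spider | Problem.py | convert
-- ===== SOURCE A (Python) =====
-- def convert(s):
-- 	res = ''
-- 	for c in s:
-- 		if c == '\'':
-- 			res += '\'\''
-- 		else:
-- 			res += c
-- 	return res
-- ===== SOURCE B (Python) =====
-- def convert(s):
--     return "''".join(s.split("'"))
-- ===== Notes on version B (the rewrite author's own statement) =====
-- stated objective: idiomatic
-- what changed: Replaces the per-character accumulation loop with a split-on-quote then join-with-doubled-quote decomposition (delimiter scan + reassembly instead of an equality test per character).
import Mathlib
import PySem

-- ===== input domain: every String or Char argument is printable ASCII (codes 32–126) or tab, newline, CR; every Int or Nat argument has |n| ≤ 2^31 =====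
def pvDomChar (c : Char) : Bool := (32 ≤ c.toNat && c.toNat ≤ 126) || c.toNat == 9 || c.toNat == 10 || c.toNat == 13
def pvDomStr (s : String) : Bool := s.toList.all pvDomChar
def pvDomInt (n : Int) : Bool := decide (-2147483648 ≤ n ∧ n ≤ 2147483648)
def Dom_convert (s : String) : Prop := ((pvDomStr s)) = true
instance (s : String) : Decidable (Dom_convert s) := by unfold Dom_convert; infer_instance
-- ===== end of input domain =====

-- B replaces A's per-character accumulation loop by split-on-quote / join-with-doubled-quote (idiomatic; same cost).


-- ===== PORT A =====
-- res = ''; for c in s: res += "''" if c == "'" else c; return res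
def convert (s : String) : String :=
  String.ofList (s.toList.foldl
    (fun res c => res ++ (if c = '\'' then ['\'', '\''] else [c])) [])

-- ===== PORT B =====
-- return "''".join(s.split("'")); s.split("'") with nonempty sep = PySem.Chars.splitOn
def convert_alt (s : String) : String :=
  String.ofList (PySem.Chars.join ['\'', '\''] (PySem.Chars.splitOn s.toList ['\'']))

-- ===== PRECONDITION & SPEC =====
def Spec_convert (s : String) (out : String) : Prop := out = convert_alt s
instance (s : String) (out : String) : Decidable (Spec_convert s out) := by unfold Spec_convert; infer_instance

-- ===== CLAIM (what is proved, stated in full; the proofs are below) =====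
def Claim_equal_convert : Prop := ∀ (s : String), Dom_convert s → Spec_convert s (convert s)

-- ===== LEMMAS AND PROOFS =====

/-- The doubling map A applies character by character. -/
def pvG (c : Char) : List Char := if c = '\'' then ['\'', '\''] else [c]

theorem pv_intercalate_cons_cons (sep x : List Char) (ys : List (List Char)) (hys : ys ≠ []) :
    sep.intercalate (x :: ys) = x ++ sep ++ sep.intercalate ys := by
  cases ys with
  | nil => exact absurd rfl hys
  | cons y zs => simp [List.intercalate, List.intersperse]

theorem pv_intercalate_append_singleton (sep ys : List Char) :
    ∀ (xs : List (List Char)), xs ≠ [] →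
      sep.intercalate (xs ++ [ys]) = sep.intercalate xs ++ sep ++ ys := by
  intro xs hxs
  induction xs with
  | nil => exact absurd rfl hxs
  | cons x xs ih =>
    cases xs with
    | nil => simp [List.intercalate]
    | cons y zs =>
      have h := ih (by simp)
      rw [List.cons_append, pv_intercalate_cons_cons sep x _ (by simp),
          pv_intercalate_cons_cons sep x _ (by simp), h]
      simp

theorem pv_go_join (J : List Char) (hJ : J = ['\'', '\'']) :
    ∀ (fuel : Nat) (l cur : List Char) (acc : List (List Char)),
      l.length < fuel →
      PySem.Chars.join J (PySem.Chars.splitOn.go ['\''] fuel l cur acc) =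
        PySem.Chars.join J ((cur.reverse :: acc).reverse) ++ l.flatMap pvG := by
  intro fuel
  induction fuel with
  | zero => intro l cur acc h; omega
  | succ fuel ih =>
    intro l cur acc h
    cases l with
    | nil => simp [PySem.Chars.splitOn.go]
    | cons c rest =>
      rw [PySem.Chars.splitOn.go]
      by_cases hc : c = '\''
      · have hpre : (['\''] : List Char).isPrefixOf (c :: rest) = true := by
          simp [hc, List.isPrefixOf]
        rw [if_pos hpre]
        have hdrop : List.drop (['\''] : List Char).length (c :: rest) = rest := rfl
        rw [hdrop, ih rest [] (cur.reverse :: acc) (by simpa using Nat.lt_of_succ_lt_succ h)]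
        have hne : (acc.reverse ++ [cur.reverse] : List (List Char)) ≠ [] := by simp
        simp only [List.reverse_cons, List.reverse_nil, PySem.Chars.join, List.append_assoc]
        rw [show acc.reverse ++ ([cur.reverse] ++ [([] : List Char)])
              = (acc.reverse ++ [cur.reverse]) ++ [([] : List Char)] by simp,
            pv_intercalate_append_singleton J [] _ hne]
        simp [pvG, hc, hJ]
      · have hpre : (['\''] : List Char).isPrefixOf (c :: rest) = false := by
          simp only [List.isPrefixOf, Bool.and_eq_false_iff, beq_eq_false_iff_ne, ne_eq]
          exact Or.inl fun h => hc h.symm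
        rw [if_neg (by simp [hpre])]
        rw [ih rest (c :: cur) acc (by simpa using Nat.lt_of_succ_lt_succ h)]
        simp only [PySem.Chars.join, List.reverse_cons]
        have key : J.intercalate (acc.reverse ++ [cur.reverse ++ [c]])
            = J.intercalate (acc.reverse ++ [cur.reverse]) ++ [c] := by
          cases hacc : acc.reverse with
          | nil => simp [List.intercalate, List.intersperse]
          | cons x xs =>
            rw [pv_intercalate_append_singleton J _ _ (by simp),
                pv_intercalate_append_singleton J _ _ (by simp)]
            simp
        rw [key]
        simp [pvG, hc]

theorem pv_splitOn_join (cs : List Char) :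
    PySem.Chars.join ['\'', '\''] (PySem.Chars.splitOn cs ['\'']) = cs.flatMap pvG := by
  unfold PySem.Chars.splitOn
  rw [pv_go_join ['\'', '\''] rfl (cs.length + 1) cs [] [] (by omega)]
  simp [PySem.Chars.join, List.intercalate]

theorem pv_foldl_eq (cs : List Char) :
    cs.foldl (fun res c => res ++ (if c = '\'' then ['\'', '\''] else [c])) []
      = cs.flatMap pvG := by
  have := PySem.List.foldl_append_eq_flatMap (g := pvG) (l := cs) (acc := [])
  simpa [pvG] using this

-- ===== VERDICT (by name: the statement is the Claim_ definition above) =====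
theorem convert_spec : Claim_equal_convert := by
  intro s _
  unfold Spec_convert convert convert_alt
  rw [pv_foldl_eq, pv_splitOn_join]
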